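-- pv_equiv track=rewrite | github.com/dmackinnon1/portia | build/portia.py | truthForPointers
-- ===== SOURCE A (Python) =====
-- def caskets(n):
--     return [i+1 for i in range(n)]
--
-- def initialTruthSequence(n):
--     return [0 for i in range(n)]
--
-- def truthForPointers(pointerSequence):
--     n = len(pointerSequence)
--     c = caskets(n)
--     truthSequence = initialTruthSequence(n)
--     for i in c:
--         for j in pointerSequence:
--             truthSequence[i-1] += truthAtPointer(i,j)
--     return truthSequence
--
-- def truthAtPointer(p, pointer):
--     if p == pointer :
--         return 1
--     if pointer < 0:
--         if p != -1*pointer: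
--             return 1
--     return 0
-- ===== SOURCE B (Python) =====
-- def truthForPointers(pointerSequence):
--     # One pass: count each value and the negatives, then a per-casket formula.
--     n = len(pointerSequence)
--     counts = {}
--     neg = 0
--     for j in pointerSequence:
--         counts[j] = counts.get(j, 0) + 1
--         if j < 0:
--             neg += 1
--     return [counts.get(i, 0) + neg - counts.get(-i, 0) for i in range(1, n + 1)]
-- ===== Notes on version B (the rewrite author's own statement) =====
-- stated objective: faster
-- what changed: Replaced the nested casket-by-pointer loop with a single counting pass (value counts + negative count) and a closed formula count(i)+neg-count(-i) per casket.
import Mathlib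
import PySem

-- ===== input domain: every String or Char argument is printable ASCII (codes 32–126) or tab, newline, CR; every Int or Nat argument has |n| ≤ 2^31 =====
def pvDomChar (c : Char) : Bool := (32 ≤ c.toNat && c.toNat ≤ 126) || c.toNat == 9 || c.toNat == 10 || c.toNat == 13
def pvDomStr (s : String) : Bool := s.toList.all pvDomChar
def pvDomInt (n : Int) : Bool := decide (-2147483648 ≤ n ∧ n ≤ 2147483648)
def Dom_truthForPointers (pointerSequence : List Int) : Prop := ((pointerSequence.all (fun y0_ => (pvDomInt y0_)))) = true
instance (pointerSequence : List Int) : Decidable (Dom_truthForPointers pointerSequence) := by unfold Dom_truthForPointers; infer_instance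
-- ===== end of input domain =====

-- B replaces A's O(n^2) nested loops with one counting pass and a per-casket closed formula (faster, asymptotic).

-- ===== PORT A =====
def caskets (n : Int) : List Int :=
  (PySem.List.pyRange 0 n 1).map (fun i => i + 1)

def initialTruthSequence (n : Int) : List Int :=
  (PySem.List.pyRange 0 n 1).map (fun _ => 0)

def truthAtPointer (p pointer : Int) : Int :=
  if p = pointer then 1
  else if pointer < 0 then (if p ≠ -1 * pointer then 1 else 0)
  else 0

def truthForPointers (pointerSequence : List Int) : List Int :=
  let n : Int := pointerSequence.length
  let c := caskets n
  let truthSequence := initialTruthSequence n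
  -- truthSequence[i-1] += …  ported with pyGetD/pySetD; exact here since 0 ≤ i-1 < n
  c.foldl (fun ts i =>
    pointerSequence.foldl (fun ts j =>
      PySem.List.pySetD ts (i - 1) (PySem.List.pyGetD ts (i - 1) 0 + truthAtPointer i j)) ts)
    truthSequence

-- ===== PORT B =====
def truthForPointers_alt (pointerSequence : List Int) : List Int :=
  let n : Int := pointerSequence.length
  let st := pointerSequence.foldl
    (fun (st : PySem.Dict Int Int × Int) j =>
      (st.1.modify j 0 (· + 1), if j < 0 then st.2 + 1 else st.2))
    (PySem.Dict.empty, 0)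
  (PySem.List.pyRange 1 (n + 1) 1).map (fun i => st.1.getD i 0 + st.2 - st.1.getD (-i) 0)

-- ===== PRECONDITION & SPEC =====
def Spec_truthForPointers (pointerSequence : List Int) (out : List Int) : Prop := out = truthForPointers_alt pointerSequence
instance (pointerSequence : List Int) (out : List Int) : Decidable (Spec_truthForPointers pointerSequence out) := by unfold Spec_truthForPointers; infer_instance

-- ===== CLAIM (what is proved, stated in full; the proofs are below) =====
def Claim_equal_truthForPointers : Prop := ∀ (pointerSequence : List Int), Dom_truthForPointers pointerSequence → Spec_truthForPointers pointerSequence (truthForPointers pointerSequence)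

-- ===== LEMMAS AND PROOFS =====

-- total truth contribution of a pointer list to casket i
def sumT (i : Int) (l : List Int) : Int := (l.map (truthAtPointer i)).sum

theorem sumT_nil (i : Int) : sumT i [] = 0 := rfl

theorem sumT_cons (i j : Int) (l : List Int) :
    sumT i (j :: l) = truthAtPointer i j + sumT i l := by
  simp [sumT]

-- the inner loop sets slot k := old + sumT i l
theorem inner_loop (i : Int) (l : List Int) :
    ∀ (ts : List Int) (k : Nat), k < ts.length → i - 1 = (k : Int) →
    l.foldl (fun ts j =>
      PySem.List.pySetD ts (i - 1) (PySem.List.pyGetD ts (i - 1) 0 + truthAtPointer i j)) ts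
      = ts.set k (ts.getD k 0 + sumT i l) := by
  induction l with
  | nil =>
    intro ts k hk hi
    simp [sumT_nil, List.getD_eq_getElem?_getD, List.getElem?_eq_getElem hk,
      List.set_getElem_self]
  | cons j l ih =>
    intro ts k hk hi
    have h1 : PySem.List.pySetD ts (i - 1) (PySem.List.pyGetD ts (i - 1) 0 + truthAtPointer i j)
        = ts.set k (ts.getD k 0 + truthAtPointer i j) := by
      rw [hi]
      simp [PySem.List.pyGetD_natCast, PySem.List.pySetD_natCast]
    simp only [List.foldl_cons, h1]
    rw [ih (ts.set k (ts.getD k 0 + truthAtPointer i j)) k (by simpa using hk) hi]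
    simp [List.set_set, sumT_cons, List.getD_eq_getElem?_getD, List.getElem?_set_self hk]
    ring_nf

-- the outer loop, processed up to casket m, yields the map prefix plus untouched zeros
theorem outer_loop (l : List Int) (m : Nat) (hm : m ≤ l.length) :
    (PySem.List.pyRange 1 ((m : Int) + 1) 1).foldl (fun ts i =>
      l.foldl (fun ts j =>
        PySem.List.pySetD ts (i - 1) (PySem.List.pyGetD ts (i - 1) 0 + truthAtPointer i j)) ts)
      (List.replicate l.length (0 : Int))
    = (PySem.List.pyRange 1 ((m : Int) + 1) 1).map (fun i => sumT i l)
      ++ List.replicate (l.length - m) 0 := by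
  induction m with
  | zero =>
    simp [PySem.List.pyRange_one_eq_nil]
  | succ m ih =>
    have hm' : m ≤ l.length := Nat.le_of_succ_le hm
    have hs : PySem.List.pyRange 1 (((m : Nat) + 1 : Nat) + 1 : Int) 1
        = PySem.List.pyRange 1 ((m : Int) + 1) 1 ++ [(m : Int) + 1] := by
      have := PySem.List.pyRange_one_succ_right (a := 1) (b := (m : Int) + 1) (by omega)
      push_cast
      convert this using 2
    rw [hs, List.foldl_append, List.map_append, ih hm']
    simp only [List.foldl_cons, List.foldl_nil]
    have hlen : ((PySem.List.pyRange 1 ((m : Int) + 1) 1).map (fun i => sumT i l)).length = m := by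
      simp [PySem.List.length_pyRange_one]
    have hrep : List.replicate (l.length - m) (0 : Int)
        = 0 :: List.replicate (l.length - (m + 1)) 0 := by
      have : l.length - m = (l.length - (m + 1)) + 1 := by omega
      rw [this, List.replicate_succ]
    rw [hrep]
    set pre := (PySem.List.pyRange 1 ((m : Int) + 1) 1).map (fun i => sumT i l) with hpre
    have hk : m < (pre ++ 0 :: List.replicate (l.length - (m + 1)) (0 : Int)).length := by
      simp [hlen]
    rw [inner_loop ((m : Int) + 1) l _ m hk (by push_cast; ring)]
    have hget : (pre ++ 0 :: List.replicate (l.length - (m + 1)) (0 : Int)).getD m 0 = 0 := by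
      rw [List.getD_eq_getElem?_getD, List.getElem?_append_right (by omega)]
      simp [hlen]
    rw [hget]
    rw [List.set_append_right _ _ (by omega)]
    simp [hlen]

theorem count_formula (i : Int) (hi : 1 ≤ i) (l : List Int) :
    sumT i l = (l.count i : Int) + (l.countP (fun j => decide (j < 0)) : Int) - (l.count (-i) : Int) := by
  induction l with
  | nil => simp [sumT_nil]
  | cons j l ih =>
    rw [sumT_cons, ih]
    simp only [List.count_cons, List.countP_cons]
    have : truthAtPointer i j
        = (if j = i then 1 else 0) + (if j < 0 then 1 else 0) - (if j = -i then 1 else 0) := by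
      unfold truthAtPointer
      split_ifs <;> omega
    rw [this]
    push_cast
    split_ifs <;> simp_all <;> omega

-- split the paired fold of B into its two independent components
theorem pair_fold (l : List Int) (d : PySem.Dict Int Int) (c : Int) :
    l.foldl (fun (st : PySem.Dict Int Int × Int) j =>
      (st.1.modify j 0 (· + 1), if j < 0 then st.2 + 1 else st.2)) (d, c)
    = (l.foldl (fun d j => d.modify j 0 (· + 1)) d,
       l.foldl (fun c j => if j < 0 then c + 1 else c) c) := by
  induction l generalizing d c with
  | nil => rfl
  | cons j l ih => simp [List.foldl_cons, ih]

theorem truthForPointers_spec' (l : List Int) :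
    truthForPointers l = truthForPointers_alt l := by
  unfold truthForPointers truthForPointers_alt
  simp only []
  have hinit : initialTruthSequence (l.length : Int) = List.replicate l.length 0 := by
    unfold initialTruthSequence
    rw [PySem.List.pyRange_one]
    simp [List.eq_replicate_iff]
  have hcask : caskets (l.length : Int) = PySem.List.pyRange 1 ((l.length : Int) + 1) 1 := by
    unfold caskets
    rw [PySem.List.pyRange_one, PySem.List.pyRange_one]
    simp [List.map_map]
    intro a _
    omega
  rw [hinit, hcask, outer_loop l l.length le_rfl]
  rw [pair_fold]
  simp only [Nat.sub_self, List.replicate_zero, List.append_nil]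
  apply List.map_congr_left
  intro i hi
  have hi1 : 1 ≤ i := (PySem.List.mem_pyRange_one.mp hi).1
  rw [count_formula i hi1 l]
  have hc1 : (l.foldl (fun d j => d.modify j 0 (· + 1)) PySem.Dict.empty).getD i 0
      = (l.count i : Int) := by
    rw [PySem.Dict.getD_foldl_modify_add_one]
    simp [PySem.Dict.getD_empty]
  have hc2 : (l.foldl (fun d j => d.modify j 0 (· + 1)) PySem.Dict.empty).getD (-i) 0
      = (l.count (-i) : Int) := by
    rw [PySem.Dict.getD_foldl_modify_add_one]
    simp [PySem.Dict.getD_empty]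
  have hc3 : l.foldl (fun c j => if j < 0 then c + 1 else c) (0 : Int)
      = (l.countP (fun j => decide (j < 0)) : Int) := by
    rw [PySem.List.foldl_ite_add_one]
    simp
  rw [hc1, hc2, hc3]

-- ===== VERDICT (by name: the statement is the Claim_ definition above) =====
theorem truthForPointers_spec : Claim_equal_truthForPointers := by
  intro l _
  exact truthForPointers_spec' l
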